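-- pv_equiv track=rewrite | github.com/pypi-data/pypi-mirror-402 | packages/gatekit/gatekit-0.1.0-py3-none-any.whl/gatekit/tui/utils/field_registry.py | _instance_to_schema_path
-- ===== SOURCE A (Python) =====
-- def _instance_to_schema_path(instance_path: str) -> str:
--     """Convert instance path to schema path.
--
--     Example:
--         /tools/0/action -> /properties/tools/items/properties/action
--     """
--     if not instance_path or instance_path == "/":
--         return "/"
--
--     parts = instance_path.strip("/").split("/")
--     schema_parts = []
--     in_array = False
--
--     for _i, part in enumerate(parts):
--         if part.isdigit():
--             # This is an array index
--             # The previous part was the array property name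
--             # Replace the array property with items
--             if not in_array:
--                 # First array index - add /items
--                 schema_parts.append("items")
--                 in_array = True
--         else:
--             # This is a property name
--             if in_array:
--                 # Property within array item
--                 in_array = False
--                 schema_parts.append("properties")
--                 schema_parts.append(part)
--             else:
--                 # Regular property
--                 schema_parts.append("properties")
--                 schema_parts.append(part)
--
--     return "/" + "/".join(schema_parts)
-- ===== SOURCE B (Python) =====
-- def _instance_to_schema_path(instance_path: str) -> str:
--     """Convert instance path to schema path (recursive run-collapsing)."""
--     if not instance_path or instance_path == "/":
--         return "/"
--
--     def emit(parts):
--         if not parts: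
--             return []
--         p = parts[0]
--         if p.isdigit():
--             rest = parts[1:]
--             while rest and rest[0].isdigit():
--                 rest = rest[1:]
--             return ["items"] + emit(rest)
--         return ["properties", p] + emit(parts[1:])
--
--     return "/" + "/".join(emit(instance_path.strip("/").split("/")))
-- ===== Notes on version B (the rewrite author's own statement) =====
-- stated objective: alternative
-- what changed: Replaces A's single loop with a mutable in_array flag by a recursive helper that consumes each run of consecutive digit segments in one step (emitting one 'items' per run) and recurses on the remainder.
import Mathlib
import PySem

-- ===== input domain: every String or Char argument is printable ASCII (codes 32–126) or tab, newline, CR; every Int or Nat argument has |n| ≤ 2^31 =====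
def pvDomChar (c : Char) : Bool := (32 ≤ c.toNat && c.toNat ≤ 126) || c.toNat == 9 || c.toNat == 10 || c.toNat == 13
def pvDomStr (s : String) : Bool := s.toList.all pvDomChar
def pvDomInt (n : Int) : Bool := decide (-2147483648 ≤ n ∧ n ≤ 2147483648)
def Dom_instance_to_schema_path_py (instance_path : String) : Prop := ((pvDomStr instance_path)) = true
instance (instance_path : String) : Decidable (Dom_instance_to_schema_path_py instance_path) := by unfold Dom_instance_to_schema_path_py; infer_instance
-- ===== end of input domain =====

-- B replaces A's mutable in_array flag by a recursive helper that collapses each run of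
-- digit segments in one step (alternative decomposition, same cost).

-- ===== PORT A =====
-- the loop state: (schema_parts, in_array)
def pvStepA (acc : List String × Bool) (part : String) : List String × Bool :=
  if PySem.Str.strIsdigit part then
    if !acc.2 then (acc.1 ++ ["items"], true) else acc
  else
    if acc.2 then (acc.1 ++ ["properties", part], false)
    else (acc.1 ++ ["properties", part], acc.2)

def instance_to_schema_path_py (instance_path : String) : String :=
  if instance_path == "" || instance_path == "/" then "/"
  else
    let parts := (PySem.Str.split? (PySem.Str.stripChars instance_path "/") "/").getD []
    let st := parts.foldl pvStepA (([] : List String), false)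
    "/" ++ PySem.Str.join "/" st.1

-- ===== PORT B =====
-- the inner 'while rest and rest[0].isdigit(): rest = rest[1:]'
def pvDropDigits : List String → List String
  | [] => []
  | p :: rest => if PySem.Str.strIsdigit p then pvDropDigits rest else p :: rest

theorem pvDropDigits_length_le (l : List String) : (pvDropDigits l).length ≤ l.length := by
  induction l with
  | nil => simp [pvDropDigits]
  | cons p rest ih =>
    simp only [pvDropDigits]
    split
    · exact Nat.le_succ_of_le ih
    · simp

-- the recursive 'emit'
def pvEmit : List String → List String
  | [] => []
  | p :: rest =>
    if PySem.Str.strIsdigit p then "items" :: pvEmit (pvDropDigits rest)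
    else "properties" :: p :: pvEmit rest
termination_by l => l.length
decreasing_by
  · exact Nat.lt_succ_of_le (pvDropDigits_length_le rest)
  · simp

def instance_to_schema_path_py_alt (instance_path : String) : String :=
  if instance_path == "" || instance_path == "/" then "/"
  else
    "/" ++ PySem.Str.join "/"
      (pvEmit ((PySem.Str.split? (PySem.Str.stripChars instance_path "/") "/").getD []))

-- ===== PRECONDITION & SPEC =====
def Spec_instance_to_schema_path_py (instance_path : String) (out : String) : Prop := out = instance_to_schema_path_py_alt instance_path
instance (instance_path : String) (out : String) : Decidable (Spec_instance_to_schema_path_py instance_path out) := by unfold Spec_instance_to_schema_path_py; infer_instance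

-- ===== CLAIM (what is proved, stated in full; the proofs are below) =====
def Claim_equal_instance_to_schema_path_py : Prop := ∀ (instance_path : String), Dom_instance_to_schema_path_py instance_path → Spec_instance_to_schema_path_py instance_path (instance_to_schema_path_py instance_path)

-- ===== LEMMAS AND PROOFS =====

-- A's flag loop computes exactly B's run-collapsed list:
-- from in_array = false it appends pvEmit parts, from in_array = true it appends
-- pvEmit (pvDropDigits parts).
theorem pvFold_eq_emit (parts : List String) : ∀ (acc : List String),
    (parts.foldl pvStepA (acc, false)).1 = acc ++ pvEmit parts ∧
    (parts.foldl pvStepA (acc, true)).1 = acc ++ pvEmit (pvDropDigits parts) := by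
  induction parts with
  | nil => intro acc; simp [pvEmit, pvDropDigits]
  | cons p rest ih =>
    intro acc
    by_cases h : PySem.Str.strIsdigit p = true
    · constructor
      · simp only [List.foldl_cons, pvStepA, h, Bool.not_false, if_pos]
        rw [pvEmit, if_pos h, (ih (acc ++ ["items"])).2]
        simp
      · simp only [List.foldl_cons, pvStepA, h, if_true, Bool.not_true, Bool.false_eq_true,
          if_false]
        rw [pvDropDigits, if_pos h, (ih acc).2]
    · constructor
      · simp only [List.foldl_cons, pvStepA, h, Bool.false_eq_true, if_false]
        rw [pvEmit, if_neg h, (ih (acc ++ ["properties", p])).1]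
        simp
      · simp only [List.foldl_cons, pvStepA, h, Bool.false_eq_true, if_false, if_true]
        rw [pvDropDigits, if_neg h, pvEmit, if_neg h, (ih (acc ++ ["properties", p])).1]
        simp

-- ===== VERDICT (by name: the statement is the Claim_ definition above) =====
theorem instance_to_schema_path_py_spec : Claim_equal_instance_to_schema_path_py := by
  intro s _
  unfold Spec_instance_to_schema_path_py instance_to_schema_path_py instance_to_schema_path_py_alt
  by_cases h : (s == "" || s == "/") = true
  · simp [h]
  · simp only [h, if_false, Bool.false_eq_true]
    rw [(pvFold_eq_emit _ []).1]
    simp
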